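-- pv_equiv track=rewrite | github.com/StewartThompson/PokemonTCGP-BattleSimulator | v3/models/match/battle_engine.py | _combine_cards_horizontally
-- ===== SOURCE A (Python) =====
-- from typing import List, Dict, Optional, Tuple, Union, Any
--
-- def _combine_cards_horizontally(cards: List[List[str]]) -> List[str]:
--     """Combine multiple card representations side by side"""
--     if not cards:
--         return []
--
--     # Find max height
--     max_height = max(len(card) for card in cards)
--
--     # Pad all cards to same height
--     padded_cards = []
--     for card in cards:
--         card_width = max(len(line) for line in card) if card else 0
--         padded = []
--         for i in range(max_height):
--             if i < len(card):
--                 # Pad line to card width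
--                 line = card[i]
--                 padded.append(line + " " * (card_width - len(line)))
--             else:
--                 padded.append(" " * card_width)
--         padded_cards.append(padded)
--
--     # Combine horizontally
--     combined = []
--     for i in range(max_height):
--         line_parts = [card[i] for card in padded_cards]
--         combined.append("  ".join(line_parts))  # 2 spaces between cards
--
--     return combined
-- ===== SOURCE B (Python) =====
-- def _combine_cards_horizontally(cards):
--     """Combine multiple card representations side by side (single pass, no padded grid)."""
--     if not cards:
--         return []
--     widths = [max(map(len, card), default=0) for card in cards]
--     height = max(map(len, cards))
--     return ["  ".join((card[i] if i < len(card) else "").ljust(w)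
--                       for card, w in zip(cards, widths))
--             for i in range(height)]
-- ===== Notes on version B (the rewrite author's own statement) =====
-- stated objective: simpler
-- what changed: Drops the intermediate padded_cards matrix: per-card widths and the height are computed once, then each output row is built directly in one comprehension by ljust-ing every card's i-th line (or '' past its end) to that card's width.
import Mathlib
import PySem

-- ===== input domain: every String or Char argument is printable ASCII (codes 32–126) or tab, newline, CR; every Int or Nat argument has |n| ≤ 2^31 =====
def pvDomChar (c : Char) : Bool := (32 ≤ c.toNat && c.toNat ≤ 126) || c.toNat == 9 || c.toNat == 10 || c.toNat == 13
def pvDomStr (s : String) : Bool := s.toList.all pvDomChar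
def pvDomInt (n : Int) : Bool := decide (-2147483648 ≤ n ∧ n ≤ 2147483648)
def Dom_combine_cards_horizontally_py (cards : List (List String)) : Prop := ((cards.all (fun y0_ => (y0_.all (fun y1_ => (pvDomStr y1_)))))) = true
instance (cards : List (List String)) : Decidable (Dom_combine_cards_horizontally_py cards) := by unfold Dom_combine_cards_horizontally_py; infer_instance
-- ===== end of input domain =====

-- ===== PORT A =====
-- B changes only the decomposition (no intermediate padded grid); same cost, simpler.
-- helper: " " * n  (Python string repetition; exact: List.replicate of spaces)
def pvSpaces (n : Nat) : String := String.ofList (List.replicate n ' ')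
-- helper: len(s) for a string as a Nat (Python len = number of code points = s.toList.length; exact)
def pvStrLen (s : String) : Nat := s.toList.length

-- literal port of A: pad every card to a rectangle, then join row by row
def combine_cards_horizontally_py (cards : List (List String)) : List String :=
  if cards = [] then []
  else
    -- max(len(card) for card in cards): cards ≠ [] here, so max? is some; getD 0 unreachable
    let max_height := ((cards.map (fun card => card.length)).max?).getD 0
    let padded_cards := cards.foldl (fun acc card =>
      let card_width := if card ≠ [] then ((card.map pvStrLen).max?).getD 0 else 0
      let padded := (List.range max_height).foldl (fun p i =>
        if i < card.length then
          -- card[i]: i < len(card), so getD is exact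
          let line := card.getD i ""
          p ++ [line ++ pvSpaces (card_width - pvStrLen line)]
        else p ++ [pvSpaces card_width]) []
      acc ++ [padded]) []
    (List.range max_height).foldl (fun comb i =>
      -- card[i] on a padded card: length = max_height > i, so getD is exact
      comb ++ [PySem.Str.join "  " (padded_cards.map (fun card => card.getD i ""))]) []

-- ===== PORT B =====
-- helper: s.ljust(w) (pad right with spaces to width w; exact, no-op if already wider)
def pvLjust (s : String) (w : Nat) : String := s ++ pvSpaces (w - pvStrLen s)

-- literal port of B (Source B): per-card widths + height once, each row built directly
def combine_cards_horizontally_py_alt (cards : List (List String)) : List String :=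
  if cards = [] then []
  else
    let widths := cards.map (fun card => ((card.map pvStrLen).max?).getD 0)  -- max(..., default=0)
    let height := ((cards.map (fun card => card.length)).max?).getD 0        -- cards ≠ [], max? is some
    (List.range height).map (fun i =>
      PySem.Str.join "  " ((cards.zip widths).map (fun cw =>
        pvLjust (cw.1.getD i "") cw.2)))  -- card[i] if i < len(card) else "": getD is exact

-- ===== PRECONDITION & SPEC =====
def Spec_combine_cards_horizontally_py (cards : List (List String)) (out : List String) : Prop := out = combine_cards_horizontally_py_alt cards
instance (cards : List (List String)) (out : List String) : Decidable (Spec_combine_cards_horizontally_py cards out) := by unfold Spec_combine_cards_horizontally_py; infer_instance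

-- ===== CLAIM (what is proved, stated in full; the proofs are below) =====
def Claim_equal_combine_cards_horizontally_py : Prop := ∀ (cards : List (List String)), Dom_combine_cards_horizontally_py cards → Spec_combine_cards_horizontally_py cards (combine_cards_horizontally_py cards)

-- ===== LEMMAS AND PROOFS =====

-- an append-accumulator foldl is a map
theorem pv_foldl_push {a b : Type} (f : a -> b) : forall (l : List a) (init : List b),
    l.foldl (fun acc x => acc ++ [f x]) init = init ++ l.map f := by
  intro l
  induction l with
  | nil => intro init; simp
  | cons x t ih => intro init; simp [List.foldl_cons, ih]

-- zipping a list with a map of itself is a map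
theorem pv_zip_self_map {a b : Type} (g : a -> b) : forall (l : List a),
    l.zip (l.map g) = l.map (fun x => (x, g x)) := by
  intro l
  induction l with
  | nil => rfl
  | cons x t ih => simp [List.zip_cons_cons, ih]

-- getD on a map over List.range, index in range
theorem pv_getD_map_range {b : Type} (g : Nat -> b) (H i : Nat) (d : b) (h : i < H) :
    ((List.range H).map g).getD i d = g i := by
  simp [List.getD, h]

-- A's guarded width equals B's default-0 width
theorem pv_width_eq (c : List String) :
    (if c ≠ [] then (((c.map pvStrLen).max?).getD 0) else 0) = ((c.map pvStrLen).max?).getD 0 := by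
  by_cases h : c = []
  · simp [h]
  · simp [h]

-- ===== VERDICT (by name: the statement is the Claim_ definition above) =====
theorem combine_cards_horizontally_py_spec : Claim_equal_combine_cards_horizontally_py := by
  intro cards _
  unfold Spec_combine_cards_horizontally_py combine_cards_horizontally_py combine_cards_horizontally_py_alt
  by_cases hc : cards = []
  · simp [hc]
  · simp only [hc, ite_false]
    have hpad : ∀ (card : List String) (p : List String) (W H : Nat),
        (List.range H).foldl (fun p i =>
          if i < card.length then
            p ++ [card.getD i "" ++ pvSpaces (W - pvStrLen (card.getD i ""))]
          else p ++ [pvSpaces W]) p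
        = p ++ (List.range H).map (fun i =>
            if i < card.length then
              card.getD i "" ++ pvSpaces (W - pvStrLen (card.getD i ""))
            else pvSpaces W) := by
      intro card p W H
      have : (fun (p : List String) (i : Nat) =>
          if i < card.length then
            p ++ [card.getD i "" ++ pvSpaces (W - pvStrLen (card.getD i ""))]
          else p ++ [pvSpaces W])
        = (fun (p : List String) (i : Nat) =>
          p ++ [if i < card.length then
            card.getD i "" ++ pvSpaces (W - pvStrLen (card.getD i ""))
          else pvSpaces W]) := by
        funext p i; split <;> rfl
      rw [this, pv_foldl_push]
    simp only [hpad, pv_foldl_push, List.nil_append, pv_width_eq]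
    set H := ((cards.map (fun card => card.length)).max?).getD 0 with hH
    apply List.map_congr_left
    intro i hi
    have hiH : i < H := List.mem_range.mp hi
    congr 1
    rw [pv_zip_self_map, List.map_map, List.map_map]
    apply List.map_congr_left
    intro c _
    simp only [Function.comp]
    rw [pv_getD_map_range _ _ _ _ hiH]
    by_cases hlt : i < c.length
    · simp [hlt, pvLjust]
    · simp [hlt, pvLjust, pvStrLen]
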